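-- pv_equiv track=rewrite | github.com/cmes31419/ICDLAB_Final_Project | CVSD_final_team011/Python/EB_gen.py | gen_sigmaEB_case_body
-- ===== SOURCE A (Python) =====
-- def gen_sigmaEB_case_body(B, q: int):
--     """
--     產生某一個 m 的 case 分支內容：
--       y[j][r] = XOR_k B[k][j]*sigmaE[0][k][r];
--
--     現在 sigmaE[0][k] 已經是 Σ_i sigma_i * E(i,k) 的結果。
--     """
--     lines = []
--     n = len(B)  # 8
--     m = len(B[0])
--
--     for j in range(m):
--         # lines.append(f"      // y[{j}] = Σ_k B[k][{j}] * sigmaE[0][k]")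
--         terms = []
--         for k in range(n):
--             if B[k][j] == 1:
--                 terms.append(f"sigmaE[{k}]")
--         if terms:
--             expr = " ^ ".join(terms)
--         else:
--             expr = "1'b0"
--         lines.append(f"                y[{j}] = {expr};")
--     return lines
-- ===== SOURCE B (Python) =====
-- def gen_sigmaEB_case_body(B, q: int):
--     m = len(B[0])
--     # flatten the matrix into (column, term) coordinates in row-major order
--     pairs = [(j, f"sigmaE[{k}]")
--              for k, row in enumerate(B)
--              for j in range(m)
--              if row[j] == 1]
--     # group the terms by column
--     bucket = {}
--     for j, t in pairs:
--         bucket.setdefault(j, []).append(t)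
--     lines = []
--     for j in range(m):
--         ts = bucket.get(j, [])
--         expr = " ^ ".join(ts) if ts else "1'b0"
--         lines.append(f"                y[{j}] = {expr};")
--     return lines
-- ===== Notes on version B (the rewrite author's own statement) =====
-- stated objective: alternative
-- what changed: B flattens the matrix into a (column, term) coordinate list in one row-major pass, groups the terms by column into a dict of lists, and then formats one line per column from its bucket, instead of A's per-column nested index scans that rebuild a terms list for each column.
import Mathlib
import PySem

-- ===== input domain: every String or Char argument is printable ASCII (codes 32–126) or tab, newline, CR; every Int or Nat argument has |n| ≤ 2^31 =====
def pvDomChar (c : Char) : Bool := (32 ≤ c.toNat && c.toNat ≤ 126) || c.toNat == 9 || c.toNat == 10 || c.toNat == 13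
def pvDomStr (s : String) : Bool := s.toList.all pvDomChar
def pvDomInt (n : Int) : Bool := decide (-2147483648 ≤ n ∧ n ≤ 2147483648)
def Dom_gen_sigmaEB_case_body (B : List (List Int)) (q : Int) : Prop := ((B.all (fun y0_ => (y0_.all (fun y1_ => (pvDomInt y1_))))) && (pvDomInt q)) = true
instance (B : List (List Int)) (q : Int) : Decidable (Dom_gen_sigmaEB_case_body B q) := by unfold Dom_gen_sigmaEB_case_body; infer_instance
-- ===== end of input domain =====

-- B flattens the matrix into a (column, term) coordinate list, groups it by column with a
-- dict of lists, and formats each column's bucket — instead of A's per-column nested scans;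
-- same cost, a different (group-by) algorithm.

-- ===== PORT A =====
def gen_sigmaEB_case_body (B : List (List Int)) (q : Int) : List String :=
  let n : Int := B.length
  let m : Int := (PySem.List.pyGetD B 0 []).length
  (PySem.List.pyRange 0 m 1).foldl (fun lines j =>
    let terms := (PySem.List.pyRange 0 n 1).foldl (fun terms k =>
      if PySem.List.pyGetD (PySem.List.pyGetD B k []) j 0 == 1 then
        terms ++ ["sigmaE[" ++ PySem.Int.toStr k ++ "]"]
      else terms) ([] : List String)
    let expr := if terms ≠ [] then PySem.Str.join " ^ " terms else "1'b0"
    lines ++ ["                y[" ++ PySem.Int.toStr j ++ "] = " ++ expr ++ ";"]) []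

-- ===== PORT B =====
def gen_sigmaEB_case_body_alt (B : List (List Int)) (q : Int) : List String :=
  let m : Int := (PySem.List.pyGetD B 0 []).length
  -- the comprehension: (column, term) coordinates in row-major order
  let pairs : List (Int × String) :=
    (PySem.List.enumerate B 0).flatMap (fun kr =>
      (PySem.List.pyRange 0 m 1).filterMap (fun j =>
        if PySem.List.pyGetD kr.2 j 0 == 1 then
          some (j, "sigmaE[" ++ PySem.Int.toStr kr.1 ++ "]")
        else none))
  -- bucket.setdefault(j, []).append(t)
  let bucket : PySem.Dict Int (List String) :=
    pairs.foldl (fun d p => d.modify p.1 [] (· ++ [p.2])) PySem.Dict.empty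
  (PySem.List.pyRange 0 m 1).foldl (fun lines j =>
    let ts := bucket.getD j []
    let expr := if ts ≠ [] then PySem.Str.join " ^ " ts else "1'b0"
    lines ++ ["                y[" ++ PySem.Int.toStr j ++ "] = " ++ expr ++ ";"]) []

-- ===== PRECONDITION & SPEC =====
-- Pre_ excludes exactly the inputs where A raises (IndexError): empty B, or some row
-- shorter than B[0] (A reads B[k][j] for every j < len(B[0]) and every k).
def Pre_gen_sigmaEB_case_body (B : List (List Int)) (q : Int) : Prop :=
  B ≠ [] ∧ ∀ r ∈ B, (B.getD 0 []).length ≤ r.length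
instance (B : List (List Int)) (q : Int) : Decidable (Pre_gen_sigmaEB_case_body B q) := by
  unfold Pre_gen_sigmaEB_case_body; infer_instance

def pvWitness_gen_sigmaEB_case_body : List (List Int) × Int := ([[1, 0], [0, 1], [1, 1]], 0)

def Spec_gen_sigmaEB_case_body (B : List (List Int)) (q : Int) (out : List String) : Prop := out = gen_sigmaEB_case_body_alt B q
instance (B : List (List Int)) (q : Int) (out : List String) : Decidable (Spec_gen_sigmaEB_case_body B q out) := by unfold Spec_gen_sigmaEB_case_body; infer_instance

-- ===== CLAIM (what is proved, stated in full; the proofs are below) =====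
def Claim_equal_gen_sigmaEB_case_body : Prop := ∀ (B : List (List Int)) (q : Int), Dom_gen_sigmaEB_case_body B q → Pre_gen_sigmaEB_case_body B q → Spec_gen_sigmaEB_case_body B q (gen_sigmaEB_case_body B q)

-- ===== LEMMAS AND PROOFS =====

-- canonical form both ports are reduced to
def pvLine (j : Nat) (ts : List String) : String :=
  "                y[" ++ PySem.Int.toStr (j : Int) ++ "] = " ++
    (if ts ≠ [] then PySem.Str.join " ^ " ts else "1'b0") ++ ";"

def pvCanon (B : List (List Int)) : List String :=
  (List.range (B.getD 0 []).length).map (fun j =>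
    pvLine j (((List.range B.length).filter
      (fun k => (B.getD k []).getD j 0 == 1)).map
        (fun (k : Nat) => "sigmaE[" ++ PySem.Int.toStr (k : Int) ++ "]")))

theorem pv_A_eq_canon (B : List (List Int)) (q : Int) :
    gen_sigmaEB_case_body B q = pvCanon B := by
  unfold gen_sigmaEB_case_body pvCanon
  simp only [PySem.List.pyGetD_zero, PySem.List.pyRange_zero_nat, List.foldl_map,
    PySem.List.foldl_append_singleton_eq_map, PySem.List.foldl_append_if,
    PySem.List.pyGetD_natCast, List.nil_append, pvLine]

-- the filter of the inner comprehension at a fixed column j, over a nodup index list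
theorem pv_filterMap_filter_eq (j : Nat) (c : Nat → Bool) (g : Nat → String) :
    ∀ (L : List Nat), L.Nodup →
      (L.filterMap (fun j' => if c j' then some ((j' : Int), g j') else none)).filter
          (fun p => p.1 == (j : Int))
        = if j ∈ L ∧ c j then [((j : Int), g j)] else [] := by
  intro L
  induction L with
  | nil => simp
  | cons a L' ih =>
    intro hnd
    obtain ⟨hna, hnd'⟩ := List.nodup_cons.mp hnd
    rw [List.filterMap_cons]
    by_cases haj : a = j
    · subst haj
      by_cases hc : c a
      · simp [hc, ih hnd', hna]
      · simp [hc, ih hnd', hna]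
    · have hja : j ≠ a := fun h => haj h.symm
      by_cases hc : c a
      · have h1 : (((a : Int), g a).1 == (j : Int)) = false := by simp [haj]
        simp only [hc, if_pos, List.filter_cons, h1, Bool.false_eq_true, if_false, ih hnd']
        simp [List.mem_cons, hja]
      · simp only [hc, Bool.false_eq_true, if_false, ih hnd']
        simp [List.mem_cons, hja]

theorem pv_flatMap_if_singleton {α β : Type} (p : α → Bool) (f : α → β) :
    ∀ (L : List α), L.flatMap (fun x => if p x then [f x] else []) = (L.filter p).map f := by
  intro L
  induction L with
  | nil => rfl
  | cons a L' ih => by_cases h : p a <;> simp [List.flatMap_cons, h, ih]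

theorem pv_filter_flatMap {α β : Type} (g : α → List β) (p : β → Bool) :
    ∀ (L : List α), (L.flatMap g).filter p = L.flatMap (fun x => (g x).filter p) := by
  intro L
  induction L with
  | nil => rfl
  | cons a L' ih => simp [List.flatMap_cons, List.filter_append, ih]

theorem pv_B_eq_canon (B : List (List Int)) (q : Int) :
    gen_sigmaEB_case_body_alt B q = pvCanon B := by
  unfold gen_sigmaEB_case_body_alt pvCanon
  simp only [PySem.List.pyGetD_zero]
  set M := (B.getD 0 []).length with hM
  -- normalize pairs
  rw [PySem.List.enumerate_eq_map_pyRange _ ([] : List Int)]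
  simp only [PySem.List.len, PySem.List.pyRange_zero_nat, List.flatMap_map, List.foldl_map,
    PySem.List.foldl_append_singleton_eq_map, List.nil_append, Function.comp_def,
    PySem.List.pyGetD_natCast, List.filterMap_map]
  refine List.map_congr_left (fun j hj => ?_)
  have hjM : j < M := List.mem_range.mp hj
  rw [PySem.Dict.getD_foldl_modify_append]
  rw [pv_filter_flatMap]
  have hinner : ∀ k : Nat,
      ((List.range M).filterMap (fun j' =>
          if (B.getD k []).getD j' 0 == 1 then
            some ((j' : Int), "sigmaE[" ++ PySem.Int.toStr (k : Int) ++ "]")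
          else none)).filter (fun p => p.1 == (j : Int))
        = if (B.getD k []).getD j 0 == 1 then
            [((j : Int), "sigmaE[" ++ PySem.Int.toStr (k : Int) ++ "]")] else [] := by
    intro k
    rw [pv_filterMap_filter_eq j (fun j' => (B.getD k []).getD j' 0 == 1)
      (fun _ => "sigmaE[" ++ PySem.Int.toStr (k : Int) ++ "]") (List.range M) (List.nodup_range)]
    simp [List.mem_range, hjM]
  simp only [hinner]
  rw [pv_flatMap_if_singleton (fun k : Nat => (B.getD k []).getD j 0 == 1)
    (fun k : Nat => ((j : Int), "sigmaE[" ++ PySem.Int.toStr (k : Int) ++ "]"))]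
  simp [pvLine, List.map_map, Function.comp_def]

-- ===== VERDICT (by name: the statement is the Claim_ definition above) =====
theorem gen_sigmaEB_case_body_spec : Claim_equal_gen_sigmaEB_case_body := by
  intro B q _ _
  unfold Spec_gen_sigmaEB_case_body
  rw [pv_A_eq_canon B q, pv_B_eq_canon B q]
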